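-- pv_equiv track=rewrite | github.com/jihghong/retools | retools.py | _count_capturing_groups
-- ===== SOURCE A (Python) =====
-- def _count_capturing_groups(pattern: str) -> int:
--     count = 0
--     i = 0
--     in_class = False
--     length = len(pattern)
--     while i < length:
--         char = pattern[i]
--         if char == "\\":
--             i += 2
--             continue
--         if char == "[":
--             in_class = True
--             i += 1
--             continue
--         if char == "]" and in_class:
--             in_class = False
--             i += 1
--             continue
--         if not in_class and char == "(":
--             if i + 1 < length and pattern[i + 1] == "?":
--                 if pattern.startswith("(?P<", i):
--                     count += 1
--             else:
--                 count += 1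
--         i += 1
--     return count
-- ===== SOURCE B (Python) =====
-- def _count_capturing_groups(pattern: str) -> int:
--     # Pass 1: normalize the pattern -- each escape pair and each character
--     # class collapses to a single placeholder character, so the survivor
--     # contains no escapes and no class contents.
--     out = []
--     i = 0
--     n = len(pattern)
--     while i < n:
--         c = pattern[i]
--         if c == "\\":
--             out.append("\x00")
--             i += 2
--         elif c == "[":
--             i += 1
--             while i < n:
--                 if pattern[i] == "\\":
--                     i += 2
--                 elif pattern[i] == "]":
--                     i += 1
--                     break
--                 else:
--                     i += 1
--             out.append("\x00")
--         else:
--             out.append(c)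
--             i += 1
--     s = "".join(out)
--     # Pass 2: count '(' tokens that open a capturing group.
--     count = 0
--     for j, c in enumerate(s):
--         if c == "(":
--             if j + 1 < len(s) and s[j + 1] == "?":
--                 if s.startswith("(?P<", j):
--                     count += 1
--             else:
--                 count += 1
--     return count
-- ===== Notes on version B (the rewrite author's own statement) =====
-- stated objective: alternative
-- what changed: Replaces A's single stateful index walk (an in_class flag threaded through one loop) with a two-pass strip-then-count decomposition: pass 1 collapses each escape pair and each character class to a placeholder, pass 2 counts group-opening parentheses on the normalized string.
import Mathlib
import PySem

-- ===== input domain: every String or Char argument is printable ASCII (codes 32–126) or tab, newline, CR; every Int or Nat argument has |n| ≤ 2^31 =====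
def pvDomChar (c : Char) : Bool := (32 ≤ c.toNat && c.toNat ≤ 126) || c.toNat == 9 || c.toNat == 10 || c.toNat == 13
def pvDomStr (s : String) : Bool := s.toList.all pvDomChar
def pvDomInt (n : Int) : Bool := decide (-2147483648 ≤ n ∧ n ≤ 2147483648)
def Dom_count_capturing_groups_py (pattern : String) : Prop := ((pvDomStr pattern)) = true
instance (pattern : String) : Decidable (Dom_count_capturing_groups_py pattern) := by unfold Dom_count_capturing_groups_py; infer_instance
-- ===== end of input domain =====

-- ===== PORT A =====
-- B changes: two-pass strip-then-count decomposition instead of A's single stateful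
-- scan with an in_class flag; same O(n) cost, proved to return the same count.
-- Literal transliteration of A's index walk: the loop reads pattern[i] and advances
-- i by 1 or 2, so it is ported as recursion on the suffix starting at i; the
-- startswith("(?P<", i) test becomes a pattern match on that suffix.
def pvLoopA : List Char → Bool → Int
  | [], _ => 0
  | c :: rest, inClass =>
    if c = '\\' then pvLoopA (rest.drop 1) inClass
    else if c = '[' then pvLoopA rest true
    else if c = ']' ∧ inClass = true then pvLoopA rest false
    else if inClass = false ∧ c = '(' then
      (match rest with
       | '?' :: 'P' :: '<' :: _ => (1 : Int)
       | '?' :: _ => 0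
       | _ => 1) + pvLoopA rest inClass
    else pvLoopA rest inClass
termination_by l _ => l.length
decreasing_by all_goals simp only [List.length_drop, List.length_cons]; omega

def count_capturing_groups_py (pattern : String) : Int :=
  pvLoopA pattern.toList false

-- ===== PORT B =====
-- Source B's inner class-skipping while loop
def pvSkipClass : List Char → List Char
  | [] => []
  | c :: rest =>
    if c = '\\' then pvSkipClass (rest.drop 1)
    else if c = ']' then rest
    else pvSkipClass rest
termination_by l => l.length
decreasing_by all_goals simp only [List.length_drop, List.length_cons]; omega

-- needed by pvStrip's termination proof
theorem pvSkipClass_length_le (l : List Char) : (pvSkipClass l).length ≤ l.length := by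
  fun_induction pvSkipClass l with
  | case1 => simp
  | case2 rest ih => simp only [List.length_cons, List.length_drop] at *; omega
  | case3 rest h => simp
  | case4 c rest h h2 ih => simp only [List.length_cons]; omega

-- Source B's pass 1: each escape pair and each character class becomes one placeholder
def pvStrip : List Char → List Char
  | [] => []
  | c :: rest =>
    if c = '\\' then '\x00' :: pvStrip (rest.drop 1)
    else if c = '[' then '\x00' :: pvStrip (pvSkipClass rest)
    else c :: pvStrip rest
termination_by l => l.length
decreasing_by
  · simp only [List.length_drop, List.length_cons]; omega
  · have := pvSkipClass_length_le rest; simp only [List.length_cons]; omega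
  · simp only [List.length_cons]; omega

-- Source B's pass 2: count '(' tokens on the normalized string (same suffix view of
-- the enumerate/startswith loop)
def pvCountG : List Char → Int
  | [] => 0
  | c :: rest =>
    (if c = '(' then
      (match rest with
       | '?' :: 'P' :: '<' :: _ => (1 : Int)
       | '?' :: _ => 0
       | _ => 1)
     else 0) + pvCountG rest

def count_capturing_groups_py_alt (pattern : String) : Int :=
  pvCountG (pvStrip pattern.toList)

-- ===== PRECONDITION & SPEC =====
def Spec_count_capturing_groups_py (pattern : String) (out : Int) : Prop := out = count_capturing_groups_py_alt pattern
instance (pattern : String) (out : Int) : Decidable (Spec_count_capturing_groups_py pattern out) := by unfold Spec_count_capturing_groups_py; infer_instance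

-- ===== CLAIM (what is proved, stated in full; the proofs are below) =====
def Claim_equal_count_capturing_groups_py : Prop := ∀ (pattern : String), Dom_count_capturing_groups_py pattern → Spec_count_capturing_groups_py pattern (count_capturing_groups_py pattern)

-- ===== LEMMAS AND PROOFS =====

-- one-step unfolding lemmas for the three recursive functions
theorem loopA_esc (rest : List Char) (b : Bool) :
    pvLoopA ('\\' :: rest) b = pvLoopA (rest.drop 1) b := by
  rw [pvLoopA.eq_def]; simp

theorem loopA_open (rest : List Char) (b : Bool) :
    pvLoopA ('[' :: rest) b = pvLoopA rest true := by
  rw [pvLoopA.eq_def]; simp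

theorem loopA_close_true (rest : List Char) :
    pvLoopA (']' :: rest) true = pvLoopA rest false := by
  rw [pvLoopA.eq_def]; simp

theorem loopA_paren_false (rest : List Char) :
    pvLoopA ('(' :: rest) false
      = (match rest with
         | '?' :: 'P' :: '<' :: _ => (1 : Int)
         | '?' :: _ => 0
         | _ => 1) + pvLoopA rest false := by
  rw [pvLoopA.eq_def]; simp

theorem loopA_other_true (c : Char) (rest : List Char) (h1 : ¬c = '\\') (h2 : ¬c = '[') (h3 : ¬c = ']') :
    pvLoopA (c :: rest) true = pvLoopA rest true := by
  rw [pvLoopA.eq_def]; simp [h1, h2, h3]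

theorem loopA_other_false (c : Char) (rest : List Char) (h1 : ¬c = '\\') (h2 : ¬c = '[') (h3 : ¬c = '(') :
    pvLoopA (c :: rest) false = pvLoopA rest false := by
  rw [pvLoopA.eq_def]; simp [h1, h2, h3]

theorem countG_cons_ne (c : Char) (rest : List Char) (h : ¬c = '(') :
    pvCountG (c :: rest) = pvCountG rest := by
  rw [pvCountG.eq_def]; simp [h]

theorem countG_cons_paren (rest : List Char) :
    pvCountG ('(' :: rest)
      = (match rest with
         | '?' :: 'P' :: '<' :: _ => (1 : Int)
         | '?' :: _ => 0
         | _ => 1) + pvCountG rest := by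
  rw [pvCountG.eq_def]; simp

theorem strip_cons_ne (c : Char) (rest : List Char) (h1 : ¬c = '\\') (h2 : ¬c = '[') :
    pvStrip (c :: rest) = c :: pvStrip rest := by
  rw [pvStrip.eq_def]; simp [h1, h2]

-- Inside a class, A only looks for the closing ']' (skipping escape pairs):
-- that is exactly pvSkipClass.
theorem loopA_class (l : List Char) : pvLoopA l true = pvLoopA (pvSkipClass l) false := by
  fun_induction pvSkipClass l with
  | case1 => simp [pvLoopA]
  | case2 rest ih => rw [loopA_esc]; exact ih
  | case3 rest h => rw [loopA_close_true]
  | case4 c rest h h2 ih =>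
    by_cases hb : c = '['
    · subst hb; rw [loopA_open]; exact ih
    · rw [loopA_other_true c rest h hb h2]; exact ih

-- The increment A computes from the raw suffix equals the one B computes from
-- the normalized suffix.
theorem inc_eq (rest : List Char) :
    (match rest with
     | '?' :: 'P' :: '<' :: _ => (1 : Int)
     | '?' :: _ => 0
     | _ => 1)
  = (match pvStrip rest with
     | '?' :: 'P' :: '<' :: _ => (1 : Int)
     | '?' :: _ => 0
     | _ => 1) := by
  match rest with
  | [] => simp [pvStrip.eq_def]
  | d :: r2 =>
    by_cases hd : d = '?'
    · subst hd
      rw [strip_cons_ne '?' r2 (by decide) (by decide)]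
      match r2 with
      | [] => simp [pvStrip.eq_def]
      | e :: r3 =>
        by_cases he : e = 'P'
        · subst he
          rw [strip_cons_ne 'P' r3 (by decide) (by decide)]
          match r3 with
          | [] => simp [pvStrip.eq_def]
          | f :: r4 =>
            by_cases hf : f = '<'
            · subst hf
              rw [strip_cons_ne '<' r4 (by decide) (by decide)]
              rfl
            · by_cases hb1 : f = '\\'
              · subst hb1; rw [pvStrip.eq_def]; simp
              · by_cases hb2 : f = '['
                · subst hb2; rw [pvStrip.eq_def]; simp
                · rw [strip_cons_ne f r4 hb1 hb2]
                  simp [hf]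
        · by_cases hb1 : e = '\\'
          · subst hb1; rw [pvStrip.eq_def]; simp
          · by_cases hb2 : e = '['
            · subst hb2; rw [pvStrip.eq_def]; simp
            · rw [strip_cons_ne e r3 hb1 hb2]
              simp [he]
    · by_cases hb1 : d = '\\'
      · subst hb1; rw [pvStrip.eq_def]; simp
      · by_cases hb2 : d = '['
        · subst hb2; rw [pvStrip.eq_def]; simp
        · rw [strip_cons_ne d r2 hb1 hb2]
          simp [hd]

theorem main_eq (l : List Char) : pvLoopA l false = pvCountG (pvStrip l) := by
  fun_induction pvStrip l with
  | case1 => simp [pvLoopA, pvCountG]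
  | case2 rest ih =>
    rw [loopA_esc, countG_cons_ne _ _ (by decide)]
    simpa using ih
  | case3 rest h ih =>
    rw [loopA_open, loopA_class, countG_cons_ne _ _ (by decide)]
    exact ih
  | case4 c rest h h2 ih =>
    by_cases hp : c = '('
    · subst hp
      rw [loopA_paren_false, countG_cons_paren, ih, inc_eq rest]
    · rw [loopA_other_false c rest h h2 hp, countG_cons_ne c _ hp]
      exact ih

-- ===== VERDICT (by name: the statement is the Claim_ definition above) =====
theorem count_capturing_groups_py_spec : Claim_equal_count_capturing_groups_py := by
  intro pattern _
  unfold Spec_count_capturing_groups_py count_capturing_groups_py count_capturing_groups_py_alt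
  exact main_eq pattern.toList
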